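-- pv_equiv track=rewrite | github.com/2020-ASW/kwoneyng-Park | 3월 1주차/Swim in Rising Water.py | bfs
-- ===== SOURCE A (Python) =====
-- from collections import deque
--
-- dx = [-1,0,1,0]
--
-- dy = [0,1,0,-1]
--
-- def bfs(m, arr):
--     n = len(arr)
--     if arr[0][0] > m:
--         return False
--     q = deque()
--     q.append([0,0])
--     vis = [[0]*n for _ in range(n)]
--     vis[0][0] = 1
--     while q:
--         x,y = q.popleft()
--         for i in range(4):
--             xi = x+dx[i]
--             yi = y+dy[i]
--             if 0<=xi<n and 0<=yi<n and vis[xi][yi] == 0 and arr[xi][yi] <= m: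
--                 vis[xi][yi] = 1
--                 q.append([xi,yi])
--                 if xi == n-1 and yi == n-1:
--                     return True
--     return False
-- ===== SOURCE B (Python) =====
-- def bfs(m, arr):
--     n = len(arr)
--     if arr[0][0] > m:
--         return False
--     vis = {(0, 0)}
--     stack = [(0, 0)]
--     while stack:
--         x, y = stack.pop()
--         for xi, yi in ((x - 1, y), (x, y + 1), (x + 1, y), (x, y - 1)):
--             if 0 <= xi < n and 0 <= yi < n and (xi, yi) not in vis and arr[xi][yi] <= m:
--                 if xi == n - 1 and yi == n - 1:
--                     return True
--                 vis.add((xi, yi))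
--                 stack.append((xi, yi))
--     return False
-- ===== Notes on version B (the rewrite author's own statement) =====
-- stated objective: faster
-- what changed: Replaced the FIFO-queue breadth-first search over a preallocated n-by-n 0/1 visited matrix (direction index arrays dx/dy, target tested after marking) by a LIFO-stack depth-first search over a visited set of coordinate tuples with inline neighbour tuples and the target tested before marking; the visited set grows only with cells actually reached instead of always allocating n*n entries.
-- outside the precondition, e.g. on bfs(0, [[0, 5], [5]]): A returns False, B returns False
import Mathlib
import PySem

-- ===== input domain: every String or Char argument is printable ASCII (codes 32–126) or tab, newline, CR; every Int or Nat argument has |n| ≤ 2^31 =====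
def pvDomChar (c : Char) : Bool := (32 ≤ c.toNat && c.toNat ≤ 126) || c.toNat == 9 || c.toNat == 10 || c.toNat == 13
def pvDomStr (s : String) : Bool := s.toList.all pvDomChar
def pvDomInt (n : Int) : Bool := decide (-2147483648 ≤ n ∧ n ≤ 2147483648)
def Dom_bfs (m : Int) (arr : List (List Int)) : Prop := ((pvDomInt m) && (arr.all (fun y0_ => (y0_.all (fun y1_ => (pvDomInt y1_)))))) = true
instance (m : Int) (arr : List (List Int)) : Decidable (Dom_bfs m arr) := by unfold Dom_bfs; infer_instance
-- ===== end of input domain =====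

-- B replaces A's queue-BFS over a preallocated n*n 0/1 visited matrix by a stack-DFS over a visited set of coordinate pairs, measured faster (no unconditional n*n matrix allocation).


-- ===== PORT A =====
-- shared cell getter: arr[x][y] under the in-range guards both programs place before every access
def pvCell (arr : List (List Int)) (x y : Int) : Int :=
  (PySem.List.pyGet? ((PySem.List.pyGet? arr x).getD []) y).getD 0

def pvDx : List Int := [-1, 0, 1, 0]
def pvDy : List Int := [0, 1, 0, -1]

-- vis[x][y] (read) and vis[x][y] = 1 (write); used only with 0 ≤ x,y (guarded in the loop)
def pvVisGet (vis : List (List Int)) (x y : Int) : Int := pvCell vis x y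
def pvVisSet (vis : List (List Int)) (x y : Int) : List (List Int) :=
  vis.set x.toNat ((vis.getD x.toNat []).set y.toNat 1)

-- the 'for i in range(4)' body: none = early 'return True', some = updated (queue, vis)
def pvScanA (m n : Int) (arr : List (List Int)) (x y : Int) :
    List Int → List (Int × Int) → List (List Int) → Option (List (Int × Int) × List (List Int))
  | [], q, vis => some (q, vis)
  | i :: rest, q, vis =>
    let xi := x + (PySem.List.pyGet? pvDx i).getD 0
    let yi := y + (PySem.List.pyGet? pvDy i).getD 0
    if 0 ≤ xi ∧ xi < n ∧ 0 ≤ yi ∧ yi < n ∧ pvVisGet vis xi yi = 0 ∧ pvCell arr xi yi ≤ m then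
      if xi = n - 1 ∧ yi = n - 1 then none
      else pvScanA m n arr x y rest (q ++ [(xi, yi)]) (pvVisSet vis xi yi)
    else pvScanA m n arr x y rest q vis

-- 'while q': fuel n*n+1 is a totality guard only (the loop pops at most n*n+1 times)
def pvLoopA (m n : Int) (arr : List (List Int)) :
    Nat → List (Int × Int) → List (List Int) → Bool
  | 0, _, _ => false
  | _ + 1, [], _ => false
  | fuel + 1, (x, y) :: qs, vis =>
    match pvScanA m n arr x y [0, 1, 2, 3] qs vis with
    | none => true
    | some (q', vis') => pvLoopA m n arr fuel q' vis'

def bfs (m : Int) (arr : List (List Int)) : Bool :=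
  let n : Int := arr.length
  if pvCell arr 0 0 > m then false
  else
    let vis0 := List.replicate arr.length (List.replicate arr.length (0 : Int))
    pvLoopA m n arr (arr.length * arr.length + 1) [(0, 0)] (pvVisSet vis0 0 0)

-- ===== PORT B =====
def pvNbrs (x y : Int) : List (Int × Int) := [(x - 1, y), (x, y + 1), (x + 1, y), (x, y - 1)]

-- the inner 'for xi, yi in (...)' body: none = early 'return True', some = updated (stack, vis);
-- the Python list used as a stack (append/pop at the right end) is modelled with push = cons, pop = head
def pvScanB (m n : Int) (arr : List (List Int)) :
    List (Int × Int) → List (Int × Int) → PySem.Set (Int × Int) → Option (List (Int × Int) × PySem.Set (Int × Int))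
  | [], st, vis => some (st, vis)
  | (xi, yi) :: rest, st, vis =>
    if 0 ≤ xi ∧ xi < n ∧ 0 ≤ yi ∧ yi < n ∧ ¬ ((xi, yi) ∈ vis) ∧ pvCell arr xi yi ≤ m then
      if xi = n - 1 ∧ yi = n - 1 then none
      else pvScanB m n arr rest ((xi, yi) :: st) (PySem.Set.add vis (xi, yi))
    else pvScanB m n arr rest st vis

-- 'while stack': fuel n*n+1 is a totality guard only
def pvLoopB (m n : Int) (arr : List (List Int)) :
    Nat → List (Int × Int) → PySem.Set (Int × Int) → Bool
  | 0, _, _ => false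
  | _ + 1, [], _ => false
  | fuel + 1, (x, y) :: st, vis =>
    match pvScanB m n arr (pvNbrs x y) st vis with
    | none => true
    | some (st', vis') => pvLoopB m n arr fuel st' vis'

def bfs_alt (m : Int) (arr : List (List Int)) : Bool :=
  let n : Int := arr.length
  if pvCell arr 0 0 > m then false
  else pvLoopB m n arr (arr.length * arr.length + 1) [(0, 0)] (PySem.Set.ofList [(0, 0)])

-- ===== PRECONDITION & SPEC =====
-- A raises IndexError on arr = [] or arr[0] = [] and, when arr[0][0] ≤ m, may index a ragged row
-- shorter than len(arr); Pre_ keeps the immediate-False case arr[0][0] > m and square-or-wider grids.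
-- This is slightly narrower than A's exact return set (a ragged grid whose short rows are unreachable
-- also returns): see the cite in claim.json.
def Pre_bfs (m : Int) (arr : List (List Int)) : Prop :=
  arr ≠ [] ∧ (arr.getD 0 []) ≠ [] ∧
    ((arr.getD 0 []).getD 0 0 > m ∨ ∀ row ∈ arr, arr.length ≤ row.length)
instance (m : Int) (arr : List (List Int)) : Decidable (Pre_bfs m arr) := by unfold Pre_bfs; infer_instance
def pvWitness_bfs : Int × List (List Int) := (3, [[1, 2], [4, 3]])

def Spec_bfs (m : Int) (arr : List (List Int)) (out : Bool) : Prop := out = bfs_alt m arr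
instance (m : Int) (arr : List (List Int)) (out : Bool) : Decidable (Spec_bfs m arr out) := by unfold Spec_bfs; infer_instance

-- ===== CLAIM (what is proved, stated in full; the proofs are below) =====
def Claim_equal_bfs : Prop := ∀ (m : Int) (arr : List (List Int)), Dom_bfs m arr → Pre_bfs m arr → Spec_bfs m arr (bfs m arr)

-- ===== LEMMAS AND PROOFS =====

-- spec layer: adjacency of good cells and reachability of the target from (0,0)
def InGrid (n : Int) (c : Int × Int) : Prop := 0 ≤ c.1 ∧ c.1 < n ∧ 0 ≤ c.2 ∧ c.2 < n
def GoodC (m n : Int) (arr : List (List Int)) (c : Int × Int) : Prop :=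
  InGrid n c ∧ pvCell arr c.1 c.2 ≤ m
def Adj (m n : Int) (arr : List (List Int)) (a b : Int × Int) : Prop :=
  b ∈ pvNbrs a.1 a.2 ∧ GoodC m n arr b
def ReachT (m n : Int) (arr : List (List Int)) : Prop :=
  Relation.TransGen (Adj m n arr) (0, 0) (n - 1, n - 1)

def gridL (n : Int) : List (Int × Int) :=
  (PySem.List.pyRange 0 n 1).flatMap (fun x => (PySem.List.pyRange 0 n 1).map (fun y => (x, y)))
def gridF (n : Int) : Finset (Int × Int) := (gridL n).toFinset
def MA (n : Int) (vis : List (List Int)) (c : Int × Int) : Prop :=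
  InGrid n c ∧ pvVisGet vis c.1 c.2 ≠ 0
def WFA (k : Nat) (vis : List (List Int)) : Prop :=
  vis.length = k ∧ ∀ row ∈ vis, row.length = k
def unvA (n : Int) (vis : List (List Int)) : Nat :=
  ((gridF n).filter (fun c => pvVisGet vis c.1 c.2 = 0)).card
def unvB (n : Int) (vis : List (Int × Int)) : Nat :=
  ((gridF n).filter (fun c => c ∉ vis)).card
def nbA (x y i : Int) : Int × Int :=
  (x + (PySem.List.pyGet? pvDx i).getD 0, y + (PySem.List.pyGet? pvDy i).getD 0)

lemma nbA_vals (x y : Int) : nbA x y 0 = (x - 1, y) ∧ nbA x y 1 = (x, y + 1)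
    ∧ nbA x y 2 = (x + 1, y) ∧ nbA x y 3 = (x, y - 1) := by
  refine ⟨?_, ?_, ?_, ?_⟩ <;> unfold nbA <;>
    norm_num [show (PySem.List.pyGet? pvDx 0).getD 0 = -1 from by decide,
      show (PySem.List.pyGet? pvDy 0).getD 0 = 0 from by decide,
      show (PySem.List.pyGet? pvDx 1).getD 0 = 0 from by decide,
      show (PySem.List.pyGet? pvDy 1).getD 0 = 1 from by decide,
      show (PySem.List.pyGet? pvDx 2).getD 0 = 1 from by decide,
      show (PySem.List.pyGet? pvDy 2).getD 0 = 0 from by decide,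
      show (PySem.List.pyGet? pvDx 3).getD 0 = 0 from by decide,
      show (PySem.List.pyGet? pvDy 3).getD 0 = -1 from by decide] <;> ring

lemma mem_gridF (n : Int) (c : Int × Int) : c ∈ gridF n ↔ InGrid n c := by
  cases c
  simp [gridF, gridL, InGrid, List.mem_flatMap, PySem.List.mem_pyRange_one]
  omega

lemma getD_set_eq {α : Type} (l : List α) (i : Nat) (v d : α) (h : i < l.length) :
    (l.set i v).getD i d = v := by
  simp [List.getD_eq_getElem?_getD, h]

lemma getD_set_ne {α : Type} (l : List α) (i j : Nat) (v d : α) (h : i ≠ j) :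
    (l.set i v).getD j d = l.getD j d := by
  simp [List.getD_eq_getElem?_getD, List.getElem?_set, h]

lemma getD_mem_of_lt {α : Type} (l : List α) (i : Nat) (d : α) (h : i < l.length) :
    l.getD i d ∈ l := by
  simp [List.getD_eq_getElem?_getD, List.getElem?_eq_getElem h]

lemma pyGet?_mem {α : Type} (l : List α) (i : Int) (v : α)
    (h : PySem.List.pyGet? l i = some v) : v ∈ l := by
  unfold PySem.List.pyGet? PySem.List.pyIdx? at h
  split_ifs at h <;>
    simp only [Option.bind_some, Option.bind_none] at h <;>
    first
      | exact List.mem_of_getElem? h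
      | exact absurd h (by simp)

lemma pvCell_eq_getD (g : List (List Int)) (x y : Int) (hx : 0 ≤ x) (hy : 0 ≤ y) :
    pvCell g x y = (g.getD x.toNat []).getD y.toNat 0 := by
  unfold pvCell
  simp only [PySem.List.pyGet?, PySem.List.pyIdx?, hx, hy, if_pos]
  split_ifs with h1 h2 h3 <;>
    simp_all [List.getD_eq_getElem?_getD]

lemma pvVisGet_set_self (vis : List (List Int)) (k : Nat) (hwf : WFA k vis) (x y : Int)
    (hx : 0 ≤ x) (hx2 : x < (k : Int)) (hy : 0 ≤ y) (hy2 : y < (k : Int)) :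
    pvVisGet (pvVisSet vis x y) x y = 1 := by
  obtain ⟨hlen, hrow⟩ := hwf
  have hxk : x.toNat < vis.length := by omega
  have hrl : (vis.getD x.toNat []).length = k :=
    hrow _ (getD_mem_of_lt _ _ _ hxk)
  unfold pvVisGet pvVisSet
  rw [pvCell_eq_getD _ _ _ hx hy, getD_set_eq _ _ _ _ hxk,
    getD_set_eq _ _ _ _ (by omega)]

lemma pvVisGet_set_ne (vis : List (List Int)) (x y a b : Int)
    (hx : 0 ≤ x) (hy : 0 ≤ y) (ha : 0 ≤ a) (hb : 0 ≤ b) (hne : (a, b) ≠ (x, y)) :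
    pvVisGet (pvVisSet vis x y) a b = pvVisGet vis a b := by
  unfold pvVisGet pvVisSet
  rw [pvCell_eq_getD _ _ _ ha hb, pvCell_eq_getD _ _ _ ha hb]
  by_cases hax : a = x
  · subst hax
    have hby : b ≠ y := by rintro rfl; exact hne rfl
    by_cases hlt : a.toNat < vis.length
    · rw [getD_set_eq _ _ _ _ hlt, getD_set_ne _ _ _ _ _ (by omega)]
    · rw [List.set_eq_of_length_le (by omega)]
  · rw [getD_set_ne _ _ _ _ _ (by omega)]

lemma WFA_set (k : Nat) (vis : List (List Int)) (x y : Int) (h : WFA k vis) :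
    WFA k (pvVisSet vis x y) := by
  obtain ⟨hlen, hrow⟩ := h
  by_cases hlt : x.toNat < vis.length
  · refine ⟨by simp [pvVisSet, hlen], ?_⟩
    intro row hr
    rcases List.mem_or_eq_of_mem_set hr with h | h
    · exact hrow _ h
    · subst h
      rw [List.length_set]
      exact hrow _ (getD_mem_of_lt _ _ _ hlt)
  · rw [pvVisSet, List.set_eq_of_length_le (by omega)]; exact ⟨hlen, hrow⟩

lemma pvVisGet_init (k : Nat) (a b : Int) :
    pvVisGet (List.replicate k (List.replicate k (0 : Int))) a b = 0 := by
  unfold pvVisGet pvCell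
  rcases h1 : PySem.List.pyGet? (List.replicate k (List.replicate k (0 : Int))) a with _ | row
  · simp [PySem.List.pyGet?, PySem.List.pyIdx?]
  · have : row = List.replicate k (0 : Int) := by
      have := pyGet?_mem _ _ _ h1
      simpa using (List.eq_of_mem_replicate this)
    subst this
    rcases h2 : PySem.List.pyGet? (List.replicate k (0 : Int)) b with _ | v
    · simp only [Option.getD_some]; rw [h2]; rfl
    · have hv : v = 0 := List.eq_of_mem_replicate (pyGet?_mem _ _ _ h2)
      simp only [Option.getD_some]; rw [h2, hv]; rfl

lemma unvA_set_step (n : Int) (k : Nat) (hk : n = (k : Int)) (vis : List (List Int))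
    (hwf : WFA k vis) (x y : Int) (hg : InGrid n (x, y)) (h0 : pvVisGet vis x y = 0) :
    unvA n (pvVisSet vis x y) + 1 = unvA n vis := by
  obtain ⟨hx, hx2, hy, hy2⟩ := hg
  unfold unvA
  have hfe : (gridF n).filter (fun c => pvVisGet (pvVisSet vis x y) c.1 c.2 = 0)
      = ((gridF n).filter (fun c => pvVisGet vis c.1 c.2 = 0)).erase (x, y) := by
    ext c
    simp only [Finset.mem_filter, Finset.mem_erase]
    constructor
    · rintro ⟨hcg, hc0⟩
      obtain ⟨ha, _, hb, _⟩ := (mem_gridF n c).mp hcg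
      by_cases hcx : c = (x, y)
      · exfalso
        rw [hcx] at hc0
        rw [pvVisGet_set_self vis k hwf x y hx (by omega) hy (by omega)] at hc0
        omega
      · refine ⟨hcx, hcg, ?_⟩
        rw [pvVisGet_set_ne vis x y c.1 c.2 hx hy ha hb (by simpa using hcx)] at hc0
        exact hc0
    · rintro ⟨hcx, hcg, hc0⟩
      obtain ⟨ha, _, hb, _⟩ := (mem_gridF n c).mp hcg
      refine ⟨hcg, ?_⟩
      rw [pvVisGet_set_ne vis x y c.1 c.2 hx hy ha hb (by simpa using hcx)]
      exact hc0
  rw [hfe]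
  exact Finset.card_erase_add_one (by
    simp only [Finset.mem_filter]
    exact ⟨(mem_gridF n (x, y)).mpr ⟨hx, hx2, hy, hy2⟩, h0⟩)

lemma unvB_add_step (n : Int) (vis : List (Int × Int)) (c : Int × Int)
    (hg : InGrid n c) (h0 : c ∉ vis) :
    unvB n (PySem.Set.add vis c) + 1 = unvB n vis := by
  unfold unvB
  have hfe : (gridF n).filter (fun d => d ∉ PySem.Set.add vis c)
      = ((gridF n).filter (fun d => d ∉ vis)).erase c := by
    ext d
    simp only [Finset.mem_filter, Finset.mem_erase, PySem.Set.mem_add]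
    constructor
    · rintro ⟨hdg, hd⟩
      push_neg at hd
      exact ⟨hd.2, hdg, hd.1⟩
    · rintro ⟨hdc, hdg, hd⟩
      refine ⟨hdg, ?_⟩
      push_neg
      exact ⟨hd, hdc⟩
  rw [hfe]
  exact Finset.card_erase_add_one (by
    simp only [Finset.mem_filter]
    exact ⟨(mem_gridF n c).mpr hg, h0⟩)

lemma card_gridF (n : Int) (h : 0 ≤ n) : (gridF n).card = n.toNat * n.toNat := by
  have he : gridF n = (Finset.Icc (0 : Int) (n-1)) ×ˢ (Finset.Icc (0 : Int) (n-1)) := by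
    ext c
    rw [mem_gridF]
    cases c
    simp [InGrid, Finset.mem_Icc]
    omega
  rw [he, Finset.card_product, Int.card_Icc]
  have : (n - 1 + 1 - 0).toNat = n.toNat := by omega
  rw [this]

lemma unvA_lt (n : Int) (vis : List (List Int)) (hmark : MA n vis (0, 0)) :
    unvA n vis < n.toNat * n.toNat := by
  obtain ⟨hg, hv⟩ := hmark
  have h00 : ((0, 0) : Int × Int) ∈ gridF n := (mem_gridF n (0, 0)).mpr hg
  have hsub : (gridF n).filter (fun c => pvVisGet vis c.1 c.2 = 0) ⊆ (gridF n).erase (0, 0) := by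
    intro c hc
    simp only [Finset.mem_filter] at hc
    refine Finset.mem_erase.mpr ⟨?_, hc.1⟩
    rintro rfl
    exact hv hc.2
  have h1 : unvA n vis ≤ (gridF n).card - 1 := by
    calc unvA n vis ≤ ((gridF n).erase (0, 0)).card := Finset.card_le_card hsub
    _ = (gridF n).card - 1 := Finset.card_erase_of_mem h00
  have h2 : (gridF n).card = n.toNat * n.toNat := card_gridF n (by obtain ⟨_, h, _⟩ := hg; omega)
  have h3 : 1 ≤ n.toNat := by obtain ⟨_, h, _⟩ := hg; omega
  have h4 : 1 * 1 ≤ n.toNat * n.toNat := Nat.mul_le_mul h3 h3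
  generalize hT : n.toNat * n.toNat = T at h2 h4 ⊢
  omega

lemma unvB_lt (n : Int) (vis : List (Int × Int)) (hs : (0, 0) ∈ vis) (hg : InGrid n (0, 0)) :
    unvB n vis < n.toNat * n.toNat := by
  have h00 : ((0, 0) : Int × Int) ∈ gridF n := (mem_gridF n (0, 0)).mpr hg
  have hsub : (gridF n).filter (fun c => c ∉ vis) ⊆ (gridF n).erase (0, 0) := by
    intro c hc
    simp only [Finset.mem_filter] at hc
    refine Finset.mem_erase.mpr ⟨?_, hc.1⟩
    rintro rfl
    exact hc.2 hs
  have h1 : unvB n vis ≤ (gridF n).card - 1 := by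
    calc unvB n vis ≤ ((gridF n).erase (0, 0)).card := Finset.card_le_card hsub
    _ = (gridF n).card - 1 := Finset.card_erase_of_mem h00
  have h2 : (gridF n).card = n.toNat * n.toNat := card_gridF n (by obtain ⟨_, h, _⟩ := hg; omega)
  have h3 : 1 ≤ n.toNat := by obtain ⟨_, h, _⟩ := hg; omega
  have h4 : 1 * 1 ≤ n.toNat * n.toNat := Nat.mul_le_mul h3 h3
  generalize hT : n.toNat * n.toNat = T at h2 h4 ⊢
  omega

lemma nbA_mem (x y i : Int) (h : i ∈ ([0, 1, 2, 3] : List Int)) :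
    nbA x y i ∈ pvNbrs x y := by
  obtain ⟨h0, h1, h2, h3⟩ := nbA_vals x y
  simp only [List.mem_cons, List.not_mem_nil, or_false] at h
  rcases h with rfl | rfl | rfl | rfl
  · rw [h0]; simp [pvNbrs]
  · rw [h1]; simp [pvNbrs]
  · rw [h2]; simp [pvNbrs]
  · rw [h3]; simp [pvNbrs]

lemma nbr_complete (x y : Int) (b : Int × Int) (h : b ∈ pvNbrs x y) :
    ∃ i ∈ ([0, 1, 2, 3] : List Int), nbA x y i = b := by
  obtain ⟨h0, h1, h2, h3⟩ := nbA_vals x y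
  simp only [pvNbrs, List.mem_cons, List.not_mem_nil, or_false] at h
  rcases h with rfl | rfl | rfl | rfl
  · exact ⟨0, by simp, h0⟩
  · exact ⟨1, by simp, h1⟩
  · exact ⟨2, by simp, h2⟩
  · exact ⟨3, by simp, h3⟩

lemma chain_marked (m n : Int) (arr : List (List Int)) (X : (Int × Int) → Prop)
    (hs : X (0, 0)) (hcl : ∀ c, X c → ∀ b, Adj m n arr c b → X b) (c : Int × Int)
    (h : Relation.ReflTransGen (Adj m n arr) (0, 0) c) : X c := by
  induction h with
  | refl => exact hs
  | tail _ hstep ih => exact hcl _ ih _ hstep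

lemma not_self_transGen (m n : Int) (arr : List (List Int))
    (ht : ((n - 1 : Int), (n - 1 : Int)) = ((0 : Int), (0 : Int))) : ¬ ReachT m n arr := by
  intro h
  unfold ReachT at h
  rw [ht] at h
  obtain ⟨b, hab, -⟩ := Relation.TransGen.head'_iff.mp h
  obtain ⟨hnbr, hg, -⟩ := hab
  have hn : n = 1 := by
    have := congrArg Prod.fst ht
    simp at this
    omega
  obtain ⟨hb1, hb2, hb3, hb4⟩ := hg
  have hb : b = ((0 : Int), (0 : Int)) := by
    cases b
    simp_all
    omega
  subst hb
  simp [pvNbrs] at hnbr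

-- ---- port A: the scan over the four directions ----
lemma scanA_none (m n : Int) (arr : List (List Int)) (x y : Int)
    (ds : List Int) (q : List (Int × Int)) (vis : List (List Int))
    (h : pvScanA m n arr x y ds q vis = none) :
    ∃ i ∈ ds, GoodC m n arr (nbA x y i) ∧ nbA x y i = (n - 1, n - 1) := by
  induction ds generalizing q vis with
  | nil => simp [pvScanA] at h
  | cons i rest ih =>
    simp only [pvScanA] at h
    by_cases hguard : 0 ≤ x + (PySem.List.pyGet? pvDx i).getD 0 ∧ x + (PySem.List.pyGet? pvDx i).getD 0 < n ∧ 0 ≤ y + (PySem.List.pyGet? pvDy i).getD 0 ∧ y + (PySem.List.pyGet? pvDy i).getD 0 < n ∧ pvVisGet vis (x + (PySem.List.pyGet? pvDx i).getD 0) (y + (PySem.List.pyGet? pvDy i).getD 0) = 0 ∧ pvCell arr (x + (PySem.List.pyGet? pvDx i).getD 0) (y + (PySem.List.pyGet? pvDy i).getD 0) ≤ m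
    case pos =>
      by_cases htar : x + (PySem.List.pyGet? pvDx i).getD 0 = n - 1 ∧ y + (PySem.List.pyGet? pvDy i).getD 0 = n - 1
      case pos =>
        refine ⟨i, by simp, ⟨⟨hguard.1, hguard.2.1, hguard.2.2.1, hguard.2.2.2.1⟩,
          hguard.2.2.2.2.2⟩, ?_⟩
        have e1 : nbA x y i = (x + (PySem.List.pyGet? pvDx i).getD 0, y + (PySem.List.pyGet? pvDy i).getD 0) := rfl
        rw [e1, htar.1, htar.2]
      case neg =>
        rw [if_pos hguard, if_neg htar] at h
        obtain ⟨i', hi1, hi2, hi3⟩ := ih _ _ h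
        exact ⟨i', List.mem_cons_of_mem _ hi1, hi2, hi3⟩
    case neg =>
      rw [if_neg hguard] at h
      obtain ⟨i', hi1, hi2, hi3⟩ := ih _ _ h
      exact ⟨i', List.mem_cons_of_mem _ hi1, hi2, hi3⟩

lemma scanA_some (m n : Int) (arr : List (List Int)) (x y : Int) (k : Nat) (hk : n = (k : Int))
    (ds : List Int) (q q' : List (Int × Int)) (vis vis' : List (List Int))
    (hwf : WFA k vis) (hnb : ∀ i ∈ ds, nbA x y i ∈ pvNbrs x y)
    (h : pvScanA m n arr x y ds q vis = some (q', vis')) :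
    WFA k vis'
    ∧ (∀ c, MA n vis c → MA n vis' c)
    ∧ (∀ c, MA n vis' c → MA n vis c ∨ ((c ∈ pvNbrs x y) ∧ GoodC m n arr c ∧ c ∈ q'))
    ∧ (∀ c, c ∈ q' → c ∈ q ∨ MA n vis' c)
    ∧ (∀ i ∈ ds, GoodC m n arr (nbA x y i) → MA n vis' (nbA x y i))
    ∧ (MA n vis' (n - 1, n - 1) → MA n vis (n - 1, n - 1))
    ∧ (q'.length + unvA n vis' = q.length + unvA n vis)
    ∧ (∀ c ∈ q, c ∈ q') := by
  induction ds generalizing q vis with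
  | nil =>
    simp only [pvScanA, Option.some.injEq, Prod.mk.injEq] at h
    obtain ⟨rfl, rfl⟩ := h
    exact ⟨hwf, fun c hc => hc, fun c hc => Or.inl hc, fun c hc => Or.inl hc,
      fun i hi => by simp at hi, fun hc => hc, rfl, fun c hc => hc⟩
  | cons i rest ih =>
    simp only [pvScanA] at h
    have hnb' : ∀ j ∈ rest, nbA x y j ∈ pvNbrs x y :=
      fun j hj => hnb j (List.mem_cons_of_mem _ hj)
    by_cases hguard : 0 ≤ x + (PySem.List.pyGet? pvDx i).getD 0 ∧ x + (PySem.List.pyGet? pvDx i).getD 0 < n ∧ 0 ≤ y + (PySem.List.pyGet? pvDy i).getD 0 ∧ y + (PySem.List.pyGet? pvDy i).getD 0 < n ∧ pvVisGet vis (x + (PySem.List.pyGet? pvDx i).getD 0) (y + (PySem.List.pyGet? pvDy i).getD 0) = 0 ∧ pvCell arr (x + (PySem.List.pyGet? pvDx i).getD 0) (y + (PySem.List.pyGet? pvDy i).getD 0) ≤ m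
    case pos =>
      by_cases htar : x + (PySem.List.pyGet? pvDx i).getD 0 = n - 1 ∧ y + (PySem.List.pyGet? pvDy i).getD 0 = n - 1
      case pos =>
        rw [if_pos hguard, if_pos htar] at h
        cases h
      case neg =>
        rw [if_pos hguard, if_neg htar] at h
        obtain ⟨hg1, hg2, hg3, hg4, hv0, hle⟩ := hguard
        have hwf1 : WFA k (pvVisSet vis (x + (PySem.List.pyGet? pvDx i).getD 0) (y + (PySem.List.pyGet? pvDy i).getD 0)) := WFA_set k vis _ _ hwf
        obtain ⟨iC1, iC2, iC3, iC4, iC5, iC6, iC7, iC8⟩ := ih _ _ hwf1 hnb' h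
        have hgridnew : InGrid n ((x + (PySem.List.pyGet? pvDx i).getD 0), (y + (PySem.List.pyGet? pvDy i).getD 0)) := ⟨hg1, hg2, hg3, hg4⟩
        have hmem1 : ∀ c, MA n (pvVisSet vis (x + (PySem.List.pyGet? pvDx i).getD 0) (y + (PySem.List.pyGet? pvDy i).getD 0)) c ↔ MA n vis c ∨ c = ((x + (PySem.List.pyGet? pvDx i).getD 0), (y + (PySem.List.pyGet? pvDy i).getD 0)) := by
          intro c
          constructor
          · rintro ⟨hcg, hcv⟩
            by_cases hc : c = ((x + (PySem.List.pyGet? pvDx i).getD 0), (y + (PySem.List.pyGet? pvDy i).getD 0))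
            · exact Or.inr hc
            · left
              refine ⟨hcg, ?_⟩
              rwa [pvVisGet_set_ne vis _ _ c.1 c.2 hg1 hg3 hcg.1 hcg.2.2.1
                (by simpa using hc)] at hcv
          · rintro (⟨hcg, hcv⟩ | rfl)
            · by_cases hc : c = ((x + (PySem.List.pyGet? pvDx i).getD 0), (y + (PySem.List.pyGet? pvDy i).getD 0))
              · subst hc
                exact ⟨hcg, by rw [pvVisGet_set_self vis k hwf _ _ hg1 (by omega) hg3 (by omega)]; omega⟩
              · exact ⟨hcg, by
                  rwa [pvVisGet_set_ne vis _ _ c.1 c.2 hg1 hg3 hcg.1 hcg.2.2.1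
                    (by simpa using hc)]⟩
            · exact ⟨hgridnew, by rw [pvVisGet_set_self vis k hwf _ _ hg1 (by omega) hg3 (by omega)]; omega⟩
        refine ⟨iC1, ?_, ?_, ?_, ?_, ?_, ?_, ?_⟩
        · intro c hc
          exact iC2 c ((hmem1 c).mpr (Or.inl hc))
        · intro c hc
          rcases iC3 c hc with hv | hnew
          · rcases (hmem1 c).mp hv with hv | rfl
            · exact Or.inl hv
            · exact Or.inr ⟨hnb i (by simp), ⟨hgridnew, hle⟩, iC8 _ (by simp)⟩
          · exact Or.inr hnew
        · intro c hc
          rcases iC4 c hc with hs | hv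
          · rcases List.mem_append.mp hs with hs | hs
            · exact Or.inl hs
            · simp only [List.mem_singleton] at hs
              subst hs
              exact Or.inr (iC2 _ ((hmem1 _).mpr (Or.inr rfl)))
          · exact Or.inr hv
        · intro j hj hgood
          rcases List.mem_cons.mp hj with rfl | hj
          · exact iC2 _ ((hmem1 _).mpr (Or.inr rfl))
          · exact iC5 j hj hgood
        · intro hc
          rcases (hmem1 _).mp (iC6 hc) with hv | he
          · exact hv
          · exfalso
            injection he with h1 h2
            exact htar ⟨h1.symm, h2.symm⟩
        · have hstep := unvA_set_step n k hk vis hwf _ _ hgridnew hv0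
          simp only [List.length_append, List.length_cons, List.length_nil] at iC7
          omega
        · intro c hc
          exact iC8 c (List.mem_append_left _ hc)
    case neg =>
      rw [if_neg hguard] at h
      obtain ⟨iC1, iC2, iC3, iC4, iC5, iC6, iC7, iC8⟩ := ih _ _ hwf hnb' h
      refine ⟨iC1, iC2, iC3, iC4, ?_, iC6, iC7, iC8⟩
      intro j hj hgood
      rcases List.mem_cons.mp hj with rfl | hj
      · refine iC2 _ ⟨hgood.1, ?_⟩
        intro h0
        exact hguard ⟨hgood.1.1, hgood.1.2.1, hgood.1.2.2.1, hgood.1.2.2.2, h0, hgood.2⟩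
      · exact iC5 j hj hgood

lemma loopA_sound (m n : Int) (arr : List (List Int)) (k : Nat) (hk : n = (k : Int))
    (fuel : Nat) (q : List (Int × Int)) (vis : List (List Int))
    (hq : ∀ c ∈ q, MA n vis c) (hwf : WFA k vis)
    (hreach : ∀ c, MA n vis c → c = (0, 0) ∨ Relation.TransGen (Adj m n arr) (0, 0) c)
    (h : pvLoopA m n arr fuel q vis = true) : ReachT m n arr := by
  induction fuel generalizing q vis with
  | zero => cases h
  | succ fuel ih =>
    rcases q with _ | ⟨⟨x, y⟩, qs⟩
    · cases h
    · have hxyv : MA n vis (x, y) := hq _ (by simp)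
      rcases hscan : pvScanA m n arr x y [0, 1, 2, 3] qs vis with _ | ⟨q', vis'⟩
      · obtain ⟨i, hi1, hi2, hi3⟩ := scanA_none m n arr x y [0, 1, 2, 3] qs vis hscan
        have hadj : Adj m n arr (x, y) (n - 1, n - 1) := by
          rw [← hi3]
          exact ⟨nbA_mem x y i hi1, hi2⟩
        unfold ReachT
        rcases hreach _ hxyv with heq | htg
        · rw [← heq]; exact Relation.TransGen.single hadj
        · exact Relation.TransGen.tail htg hadj
      · simp only [pvLoopA, hscan] at h
        obtain ⟨iC1, iC2, iC3, iC4, iC5, iC6, iC7, iC8⟩ :=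
          scanA_some m n arr x y k hk [0, 1, 2, 3] qs q' vis vis' hwf
            (fun i hi => nbA_mem x y i hi) hscan
        refine ih q' vis' ?_ iC1 ?_ h
        · intro c hc
          rcases iC4 c hc with hs | hv
          · exact iC2 _ (hq _ (List.mem_cons_of_mem _ hs))
          · exact hv
        · intro c hc
          rcases iC3 c hc with hv | ⟨hnbr, hgood, -⟩
          · exact hreach c hv
          · right
            have hadj : Adj m n arr (x, y) c := ⟨hnbr, hgood⟩
            rcases hreach _ hxyv with heq | htg
            · rw [← heq]; exact Relation.TransGen.single hadj
            · exact Relation.TransGen.tail htg hadj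

lemma loopA_complete (m n : Int) (arr : List (List Int)) (k : Nat) (hk : n = (k : Int))
    (fuel : Nat) (q : List (Int × Int)) (vis : List (List Int))
    (hfuel : q.length + unvA n vis < fuel)
    (hq : ∀ c ∈ q, MA n vis c) (hwf : WFA k vis)
    (hs0 : MA n vis (0, 0))
    (hclosed : ∀ c, MA n vis c → c ∉ q → ∀ b, Adj m n arr c b → MA n vis b)
    (htar : ((n - 1 : Int), (n - 1 : Int)) ≠ ((0 : Int), (0 : Int)) → ¬ MA n vis (n - 1, n - 1))
    (ht : ((n - 1 : Int), (n - 1 : Int)) ≠ ((0 : Int), (0 : Int)))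
    (h : pvLoopA m n arr fuel q vis = false) : ¬ ReachT m n arr := by
  induction fuel generalizing q vis with
  | zero => omega
  | succ fuel ih =>
    rcases q with _ | ⟨⟨x, y⟩, qs⟩
    · intro hr
      have hcl : ∀ c, MA n vis c → ∀ b, Adj m n arr c b → MA n vis b :=
        fun c hc => hclosed c hc (by simp)
      have := chain_marked m n arr (MA n vis) hs0 hcl _
        (Relation.TransGen.to_reflTransGen hr)
      exact htar ht this
    · have hxyv : MA n vis (x, y) := hq _ (by simp)
      rcases hscan : pvScanA m n arr x y [0, 1, 2, 3] qs vis with _ | ⟨q', vis'⟩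
      · simp only [pvLoopA, hscan] at h
        cases h
      · simp only [pvLoopA, hscan] at h
        obtain ⟨iC1, iC2, iC3, iC4, iC5, iC6, iC7, iC8⟩ :=
          scanA_some m n arr x y k hk [0, 1, 2, 3] qs q' vis vis' hwf
            (fun i hi => nbA_mem x y i hi) hscan
        refine ih q' vis' ?_ ?_ iC1 (iC2 _ hs0) ?_ ?_ h
        · simp only [List.length_cons] at hfuel
          omega
        · intro c hc
          rcases iC4 c hc with hs | hv
          · exact iC2 _ (hq _ (List.mem_cons_of_mem _ hs))
          · exact hv
        · intro c hc hcs b hb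
          rcases iC3 c hc with hv | ⟨-, -, hs'⟩
          · by_cases hcxy : c = (x, y)
            · subst hcxy
              obtain ⟨i, hi1, hi2⟩ := nbr_complete x y b hb.1
              rw [← hi2]
              refine iC5 i hi1 ?_
              rw [hi2]
              exact hb.2
            · have hnq : c ∉ qs := fun hq' => hcs (iC8 _ hq')
              have : c ∉ ((x, y) :: qs) := by
                intro hmem
                rcases List.mem_cons.mp hmem with h' | h'
                · exact hcxy h'
                · exact hnq h'
              exact iC2 _ (hclosed c hv this b hb)
          · exact absurd hs' hcs
        · intro hne ht'
          exact htar hne (iC6 ht')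

-- ---- port B: the scan over the four neighbour tuples ----
lemma scanB_none (m n : Int) (arr : List (List Int)) (x y : Int)
    (ds st : List (Int × Int)) (vis : PySem.Set (Int × Int))
    (h : pvScanB m n arr ds st vis = none) :
    ∃ c ∈ ds, GoodC m n arr c ∧ c = (n - 1, n - 1) := by
  induction ds generalizing st vis with
  | nil => simp [pvScanB] at h
  | cons c rest ih =>
    obtain ⟨xi, yi⟩ := c
    simp only [pvScanB] at h
    split_ifs at h with hguard htar
    · exact ⟨(xi, yi), by simp,
        ⟨⟨hguard.1, hguard.2.1, hguard.2.2.1, hguard.2.2.2.1⟩, hguard.2.2.2.2.2⟩,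
        by rw [htar.1, htar.2]⟩
    · obtain ⟨c', hc1, hc2, hc3⟩ := ih _ _ h
      exact ⟨c', List.mem_cons_of_mem _ hc1, hc2, hc3⟩
    · obtain ⟨c', hc1, hc2, hc3⟩ := ih _ _ h
      exact ⟨c', List.mem_cons_of_mem _ hc1, hc2, hc3⟩

lemma scanB_some (m n : Int) (arr : List (List Int)) (x y : Int)
    (ds : List (Int × Int)) (st st' : List (Int × Int)) (vis vis' : PySem.Set (Int × Int))
    (hnb : ∀ c ∈ ds, c ∈ pvNbrs x y)
    (h : pvScanB m n arr ds st vis = some (st', vis')) :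
    (∀ c, c ∈ vis → c ∈ vis')
    ∧ (∀ c, c ∈ vis' → c ∈ vis ∨ ((c ∈ pvNbrs x y) ∧ GoodC m n arr c ∧ c ∈ st'))
    ∧ (∀ c, c ∈ st' → c ∈ st ∨ c ∈ vis')
    ∧ (∀ c ∈ ds, GoodC m n arr c → c ∈ vis')
    ∧ (((n - 1, n - 1) : Int × Int) ∈ vis' → ((n - 1, n - 1) : Int × Int) ∈ vis)
    ∧ (st'.length + unvB n vis' = st.length + unvB n vis)
    ∧ (∀ c ∈ st, c ∈ st') := by
  induction ds generalizing st vis with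
  | nil =>
    simp only [pvScanB, Option.some.injEq, Prod.mk.injEq] at h
    obtain ⟨rfl, rfl⟩ := h
    exact ⟨fun c hc => hc, fun c hc => Or.inl hc, fun c hc => Or.inl hc,
      fun c hc => by simp at hc, fun hc => hc, rfl, fun c hc => hc⟩
  | cons c rest ih =>
    obtain ⟨xi, yi⟩ := c
    by_cases hguard : 0 ≤ xi ∧ xi < n ∧ 0 ≤ yi ∧ yi < n ∧ (xi, yi) ∉ vis ∧ pvCell arr xi yi ≤ m
    case pos =>
     by_cases htar : xi = n - 1 ∧ yi = n - 1
     case pos =>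
      simp only [pvScanB, if_pos hguard, if_pos htar] at h
      cases h
     case neg =>
      simp only [pvScanB, if_pos hguard, if_neg htar] at h
      obtain ⟨hg1, hg2, hg3, hg4, hnm, hle⟩ := hguard
      have hnb' : ∀ c ∈ rest, c ∈ pvNbrs x y := fun c hc => hnb c (List.mem_cons_of_mem _ hc)
      obtain ⟨iC2, iC3, iC4, iC5, iC6, iC7, iC8⟩ := ih _ _ hnb' h
      have hmem1 : ∀ c, c ∈ PySem.Set.add vis (xi, yi) ↔ c ∈ vis ∨ c = (xi, yi) :=
        fun c => PySem.Set.mem_add vis (xi, yi) c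
      refine ⟨?_, ?_, ?_, ?_, ?_, ?_, ?_⟩
      · intro c hc
        exact iC2 c ((hmem1 c).mpr (Or.inl hc))
      · intro c hc
        rcases iC3 c hc with hv | hnew
        · rcases (hmem1 c).mp hv with hv | rfl
          · exact Or.inl hv
          · exact Or.inr ⟨hnb _ (by simp), ⟨⟨hg1, hg2, hg3, hg4⟩, hle⟩,
              iC8 _ (by simp)⟩
        · exact Or.inr hnew
      · intro c hc
        rcases iC4 c hc with hs | hv
        · rcases List.mem_cons.mp hs with rfl | hs
          · exact Or.inr (iC2 _ ((hmem1 _).mpr (Or.inr rfl)))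
          · exact Or.inl hs
        · exact Or.inr hv
      · intro c hc hgood
        rcases List.mem_cons.mp hc with rfl | hc
        · exact iC2 _ ((hmem1 _).mpr (Or.inr rfl))
        · exact iC5 c hc hgood
      · intro hc
        rcases (hmem1 _).mp (iC6 hc) with hv | he
        · exact hv
        · exfalso
          have h1 := congrArg Prod.fst he
          have h2 := congrArg Prod.snd he
          simp only at h1 h2
          exact htar ⟨h1.symm, h2.symm⟩
      · have hstep := unvB_add_step n vis (xi, yi) ⟨hg1, hg2, hg3, hg4⟩ hnm
        simp only [List.length_cons] at iC7
        omega
      · intro c hc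
        exact iC8 c (List.mem_cons_of_mem _ hc)
    case neg =>
      simp only [pvScanB, if_neg hguard] at h
      have hnb' : ∀ c ∈ rest, c ∈ pvNbrs x y := fun c hc => hnb c (List.mem_cons_of_mem _ hc)
      obtain ⟨iC2, iC3, iC4, iC5, iC6, iC7, iC8⟩ := ih _ _ hnb' h
      refine ⟨iC2, iC3, iC4, ?_, iC6, iC7, iC8⟩
      intro c hc hgood
      rcases List.mem_cons.mp hc with rfl | hc
      · refine iC2 _ ?_
        by_contra hnm
        exact hguard ⟨hgood.1.1, hgood.1.2.1, hgood.1.2.2.1, hgood.1.2.2.2, hnm, hgood.2⟩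
      · exact iC5 c hc hgood

lemma loopB_sound (m n : Int) (arr : List (List Int))
    (fuel : Nat) (st : List (Int × Int)) (vis : PySem.Set (Int × Int))
    (hq : ∀ c ∈ st, c ∈ vis)
    (hreach : ∀ c, c ∈ vis → c = (0, 0) ∨ Relation.TransGen (Adj m n arr) (0, 0) c)
    (h : pvLoopB m n arr fuel st vis = true) : ReachT m n arr := by
  induction fuel generalizing st vis with
  | zero => cases h
  | succ fuel ih =>
    rcases st with _ | ⟨⟨x, y⟩, qs⟩
    · cases h
    · have hxyv : (x, y) ∈ vis := hq _ (by simp)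
      rcases hscan : pvScanB m n arr (pvNbrs x y) qs vis with _ | ⟨st', vis'⟩
      · obtain ⟨c, hc1, hc2, hc3⟩ := scanB_none m n arr x y (pvNbrs x y) qs vis hscan
        subst hc3
        have hadj : Adj m n arr (x, y) (n - 1, n - 1) := ⟨hc1, hc2⟩
        unfold ReachT
        rcases hreach _ hxyv with heq | htg
        · rw [← heq]; exact Relation.TransGen.single hadj
        · exact Relation.TransGen.tail htg hadj
      · simp only [pvLoopB, hscan] at h
        obtain ⟨iC2, iC3, iC4, iC5, iC6, iC7, iC8⟩ :=
          scanB_some m n arr x y (pvNbrs x y) qs st' vis vis' (fun c hc => hc) hscan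
        refine ih st' vis' ?_ ?_ h
        · intro c hc
          rcases iC4 c hc with hs | hv
          · exact iC2 _ (hq _ (List.mem_cons_of_mem _ hs))
          · exact hv
        · intro c hc
          rcases iC3 c hc with hv | ⟨hnbr, hgood, -⟩
          · exact hreach c hv
          · right
            have hadj : Adj m n arr (x, y) c := ⟨hnbr, hgood⟩
            rcases hreach _ hxyv with heq | htg
            · rw [← heq]; exact Relation.TransGen.single hadj
            · exact Relation.TransGen.tail htg hadj

lemma loopB_complete (m n : Int) (arr : List (List Int))
    (fuel : Nat) (st : List (Int × Int)) (vis : PySem.Set (Int × Int))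
    (hfuel : st.length + unvB n vis < fuel)
    (hq : ∀ c ∈ st, c ∈ vis)
    (hs0 : ((0, 0) : Int × Int) ∈ vis)
    (hclosed : ∀ c, c ∈ vis → c ∉ st → ∀ b, Adj m n arr c b → b ∈ vis)
    (htar : ((n - 1 : Int), (n - 1 : Int)) ≠ ((0 : Int), (0 : Int)) → ((n - 1, n - 1) : Int × Int) ∉ vis)
    (ht : ((n - 1 : Int), (n - 1 : Int)) ≠ ((0 : Int), (0 : Int)))
    (h : pvLoopB m n arr fuel st vis = false) : ¬ ReachT m n arr := by
  induction fuel generalizing st vis with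
  | zero => omega
  | succ fuel ih =>
    rcases st with _ | ⟨⟨x, y⟩, qs⟩
    · intro hr
      have hcl : ∀ c, c ∈ vis → ∀ b, Adj m n arr c b → b ∈ vis :=
        fun c hc => hclosed c hc (by simp)
      have := chain_marked m n arr (fun c => c ∈ vis) hs0 hcl _
        (Relation.TransGen.to_reflTransGen hr)
      exact htar ht this
    · have hxyv : (x, y) ∈ vis := hq _ (by simp)
      rcases hscan : pvScanB m n arr (pvNbrs x y) qs vis with _ | ⟨st', vis'⟩
      · simp only [pvLoopB, hscan] at h
        cases h
      · simp only [pvLoopB, hscan] at h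
        obtain ⟨iC2, iC3, iC4, iC5, iC6, iC7, iC8⟩ :=
          scanB_some m n arr x y (pvNbrs x y) qs st' vis vis' (fun c hc => hc) hscan
        refine ih st' vis' ?_ ?_ (iC2 _ hs0) ?_ ?_ h
        · simp only [List.length_cons] at hfuel
          omega
        · intro c hc
          rcases iC4 c hc with hs | hv
          · exact iC2 _ (hq _ (List.mem_cons_of_mem _ hs))
          · exact hv
        · intro c hc hcs b hb
          rcases iC3 c hc with hv | ⟨-, -, hs'⟩
          · by_cases hcxy : c = (x, y)
            · subst hcxy
              exact iC5 b hb.1 hb.2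
            · have hnq : c ∉ qs := fun hq' => hcs (iC8 _ hq')
              have : c ∉ ((x, y) :: qs) := by
                intro hmem
                rcases List.mem_cons.mp hmem with h' | h'
                · exact hcxy h'
                · exact hnq h'
              exact iC2 _ (hclosed c hv this b hb)
          · exact absurd hs' hcs
        · intro hne ht'
          exact htar hne (iC6 ht')

-- ---- top level ----
lemma bfs_true_iff (m : Int) (arr : List (List Int)) (h1 : arr ≠ []) :
    bfs m arr = true ↔ (pvCell arr 0 0 ≤ m ∧ ReachT m (arr.length : Int) arr) := by
  have hdef : bfs m arr = (if pvCell arr 0 0 > m then false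
      else pvLoopA m (arr.length : Int) arr (arr.length * arr.length + 1) [(0, 0)]
        (pvVisSet (List.replicate arr.length (List.replicate arr.length 0)) 0 0)) := rfl
  set k := arr.length with hkdef
  set n : Int := (arr.length : Int) with hndef
  have hk1 : 1 ≤ k := by
    cases arr
    · exact absurd rfl h1
    · simp [hkdef]
  by_cases hstart : pvCell arr 0 0 > m
  · rw [hdef, if_pos hstart]
    simp
    intro hle
    omega
  · rw [hdef, if_neg hstart]
    set vis0 := List.replicate k (List.replicate k (0 : Int)) with hv0
    set vis1 := pvVisSet vis0 0 0 with hv1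
    have hwf0 : WFA k vis0 := by
      constructor
      · simp [hv0]
      · intro row hr
        rw [List.eq_of_mem_replicate hr]
        simp
    have hwf1 : WFA k vis1 := WFA_set k vis0 0 0 hwf0
    have hgrid0 : InGrid n ((0 : Int), (0 : Int)) := by
      refine ⟨le_refl _, ?_, le_refl _, ?_⟩ <;> simp [hndef] <;> omega
    have hs0 : MA n vis1 (0, 0) := by
      refine ⟨hgrid0, ?_⟩
      rw [hv1, pvVisGet_set_self vis0 k hwf0 0 0 (le_refl _) (by exact_mod_cast hk1)
        (le_refl _) (by exact_mod_cast hk1)]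
      omega
    have honly : ∀ c, MA n vis1 c → c = ((0 : Int), (0 : Int)) := by
      intro c hc
      by_contra hne
      obtain ⟨hcg, hcv⟩ := hc
      rw [hv1, pvVisGet_set_ne vis0 0 0 c.1 c.2 (le_refl _) (le_refl _) hcg.1 hcg.2.2.1
        (by simpa using hne), hv0, pvVisGet_init] at hcv
      exact hcv rfl
    have hq : ∀ c ∈ ([((0 : Int), (0 : Int))] : List (Int × Int)), MA n vis1 c := by
      intro c hc
      simp only [List.mem_singleton] at hc
      subst hc
      exact hs0
    constructor
    · intro h
      refine ⟨by omega, ?_⟩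
      exact loopA_sound m n arr k hndef _ _ _ hq hwf1 (fun c hc => Or.inl (honly c hc)) h
    · rintro ⟨hle, hr⟩
      by_cases hts : (((n - 1 : Int), (n - 1 : Int)) : Int × Int) = (((0 : Int), (0 : Int)) : Int × Int)
      · exact absurd hr (not_self_transGen m n arr hts)
      · cases hb : pvLoopA m n arr (k * k + 1) [(0, 0)] vis1
        · exfalso
          have hfuel : ([((0 : Int), (0 : Int))] : List (Int × Int)).length + unvA n vis1 < k * k + 1 := by
            have := unvA_lt n vis1 hs0
            have hnt : n.toNat = k := Int.toNat_natCast arr.length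
            rw [hnt] at this
            simp only [List.length_singleton]
            omega
          have hclosed : ∀ c, MA n vis1 c → c ∉ ([((0 : Int), (0 : Int))] : List (Int × Int)) →
              ∀ b, Adj m n arr c b → MA n vis1 b := by
            intro c hc hcq
            exact absurd (by rw [honly c hc]; simp) hcq
          have := loopA_complete m n arr k hndef (k * k + 1) _ _ hfuel hq hwf1 hs0 hclosed
            (fun hne hMA => hne (honly _ hMA)) hts hb
          exact this hr
        · rfl

lemma bfs_alt_true_iff (m : Int) (arr : List (List Int)) (h1 : arr ≠ []) :
    bfs_alt m arr = true ↔ (pvCell arr 0 0 ≤ m ∧ ReachT m (arr.length : Int) arr) := by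
  have hdef : bfs_alt m arr = (if pvCell arr 0 0 > m then false
      else pvLoopB m (arr.length : Int) arr (arr.length * arr.length + 1) [(0, 0)]
        (PySem.Set.ofList [(0, 0)])) := rfl
  have hset : PySem.Set.ofList [(((0 : Int), (0 : Int)))] = [((0 : Int), (0 : Int))] := rfl
  set k := arr.length with hkdef
  set n : Int := (arr.length : Int) with hndef
  have hk1 : 1 ≤ k := by
    cases arr
    · exact absurd rfl h1
    · simp [hkdef]
  by_cases hstart : pvCell arr 0 0 > m
  · rw [hdef, if_pos hstart]
    simp
    intro hle
    omega
  · rw [hdef, if_neg hstart, hset]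
    set vis1 : PySem.Set (Int × Int) := [((0 : Int), (0 : Int))] with hv1
    have hgrid0 : InGrid n ((0 : Int), (0 : Int)) := by
      refine ⟨le_refl _, ?_, le_refl _, ?_⟩ <;> simp [hndef] <;> omega
    have hs0 : ((0, 0) : Int × Int) ∈ vis1 := by simp [hv1]
    have honly : ∀ c, c ∈ vis1 → c = ((0 : Int), (0 : Int)) := by
      intro c hc
      simpa [hv1] using hc
    have hq : ∀ c ∈ ([((0 : Int), (0 : Int))] : List (Int × Int)), c ∈ vis1 := by
      intro c hc
      simpa [hv1] using hc
    constructor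
    · intro h
      refine ⟨by omega, ?_⟩
      exact loopB_sound m n arr _ _ _ hq
        (fun c hc => Or.inl (honly c hc)) h
    · rintro ⟨hle, hr⟩
      by_cases hts : (((n - 1 : Int), (n - 1 : Int)) : Int × Int) = (((0 : Int), (0 : Int)) : Int × Int)
      · exact absurd hr (not_self_transGen m n arr hts)
      · cases hb : pvLoopB m n arr (k * k + 1) [(0, 0)] vis1
        · exfalso
          have hfuel : ([((0 : Int), (0 : Int))] : List (Int × Int)).length + unvB n vis1 < k * k + 1 := by
            have := unvB_lt n vis1 hs0 hgrid0
            have hnt : n.toNat = k := Int.toNat_natCast arr.length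
            rw [hnt] at this
            simp only [List.length_singleton]
            omega
          have hclosed : ∀ c, c ∈ vis1 → c ∉ ([((0 : Int), (0 : Int))] : List (Int × Int)) →
              ∀ b, Adj m n arr c b → b ∈ vis1 := by
            intro c hc hcq
            exact absurd (by rw [honly c hc]; simp) hcq
          have := loopB_complete m n arr (k * k + 1) _ _ hfuel hq hs0 hclosed
            (fun hne hm => hne (honly _ hm)) hts hb
          exact this hr
        · rfl

-- ===== VERDICT (by name: the statement is the Claim_ definition above) =====
theorem bfs_spec : Claim_equal_bfs := by
  intro m arr _ hpre
  unfold Spec_bfs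
  have h1 : arr ≠ [] := hpre.1
  have h := (bfs_true_iff m arr h1).trans (bfs_alt_true_iff m arr h1).symm
  cases hA : bfs m arr <;> cases hB : bfs_alt m arr <;> simp_all
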